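-- pv_equiv track=rewrite | github.com/OthmanMohammad/multi-agent-support-system | src/agents/revenue/customer_success/retention/win_back.py | _categorize_churn_reason
-- ===== SOURCE A (Python) =====
-- def _categorize_churn_reason(churn_reason: str) -> str:
--     """Categorize churn reason into standard categories."""
--     reason_lower = churn_reason.lower()
--
--     if any(word in reason_lower for word in ["price", "cost", "expensive", "budget"]):
--         return "price"
--     elif any(word in reason_lower for word in ["feature", "functionality", "capability", "product"]):
--         return "product_fit"
--     elif any(word in reason_lower for word in ["support", "service", "help", "response"]):
--         return "support_issues"
--     elif any(word in reason_lower for word in ["competitor", "alternative", "switched"]):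
--         return "competition"
--     elif any(word in reason_lower for word in ["business", "reorganization", "merger", "acquisition"]):
--         return "business_change"
--     elif any(word in reason_lower for word in ["usage", "adoption", "inactive", "engagement"]):
--         return "usage_low"
--     else:
--         return "unknown"
-- ===== SOURCE B (Python) =====
-- # Inverted index: each keyword maps to (priority, label); the answer is the
-- # label of the minimum-priority keyword that occurs in the lowercased reason.
-- _KEYWORD_INDEX = {
--     "price": (0, "price"), "cost": (0, "price"),
--     "expensive": (0, "price"), "budget": (0, "price"),
--     "feature": (1, "product_fit"), "functionality": (1, "product_fit"),
--     "capability": (1, "product_fit"), "product": (1, "product_fit"),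
--     "support": (2, "support_issues"), "service": (2, "support_issues"),
--     "help": (2, "support_issues"), "response": (2, "support_issues"),
--     "competitor": (3, "competition"), "alternative": (3, "competition"),
--     "switched": (3, "competition"),
--     "business": (4, "business_change"), "reorganization": (4, "business_change"),
--     "merger": (4, "business_change"), "acquisition": (4, "business_change"),
--     "usage": (5, "usage_low"), "adoption": (5, "usage_low"),
--     "inactive": (5, "usage_low"), "engagement": (5, "usage_low"),
-- }
--
-- def _categorize_churn_reason(churn_reason: str) -> str:
--     reason_lower = churn_reason.lower()
--     best_p, best_label = 7, "unknown"
--     for word, (p, label) in _KEYWORD_INDEX.items():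
--         if p < best_p and word in reason_lower:
--             best_p, best_label = p, label
--     return best_label
-- ===== Notes on version B (the rewrite author's own statement) =====
-- stated objective: alternative
-- what changed: Replaced the ordered if/elif category chain (first-match short-circuit over grouped keyword lists) by a flat inverted keyword->(priority,label) index scanned exhaustively with a running minimum-priority accumulator; the argmin over matching keywords equals A's first matching category.
import Mathlib
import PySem

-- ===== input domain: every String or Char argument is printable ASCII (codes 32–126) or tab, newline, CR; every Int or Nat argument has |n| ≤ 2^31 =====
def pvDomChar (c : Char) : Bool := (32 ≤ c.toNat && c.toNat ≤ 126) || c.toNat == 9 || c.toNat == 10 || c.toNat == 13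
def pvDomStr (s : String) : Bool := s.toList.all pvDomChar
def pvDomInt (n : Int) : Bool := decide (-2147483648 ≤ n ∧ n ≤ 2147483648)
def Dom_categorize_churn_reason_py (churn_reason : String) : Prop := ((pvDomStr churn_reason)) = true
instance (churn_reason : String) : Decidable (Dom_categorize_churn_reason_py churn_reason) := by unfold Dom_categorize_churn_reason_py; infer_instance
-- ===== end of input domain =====

-- B replaces A's if/elif first-match category chain by a flat inverted keyword->(priority,label) index scanned exhaustively with a min-priority accumulator; alternative structure, same behaviour.


-- ===== PORT A =====
def categorize_churn_reason_py (churn_reason : String) : String :=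
  let reason_lower := PySem.Str.lower churn_reason
  if ["price", "cost", "expensive", "budget"].any (fun w => PySem.Str.isIn w reason_lower) then
    "price"
  else if ["feature", "functionality", "capability", "product"].any (fun w => PySem.Str.isIn w reason_lower) then
    "product_fit"
  else if ["support", "service", "help", "response"].any (fun w => PySem.Str.isIn w reason_lower) then
    "support_issues"
  else if ["competitor", "alternative", "switched"].any (fun w => PySem.Str.isIn w reason_lower) then
    "competition"
  else if ["business", "reorganization", "merger", "acquisition"].any (fun w => PySem.Str.isIn w reason_lower) then
    "business_change"
  else if ["usage", "adoption", "inactive", "engagement"].any (fun w => PySem.Str.isIn w reason_lower) then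
    "usage_low"
  else
    "unknown"

-- ===== PORT B =====
-- Flat inverted index, in Source B's dict insertion order: keyword -> (priority, label).
def pvKeywordIndex : List (String × Int × String) :=
  [("price", 0, "price"), ("cost", 0, "price"),
   ("expensive", 0, "price"), ("budget", 0, "price"),
   ("feature", 1, "product_fit"), ("functionality", 1, "product_fit"),
   ("capability", 1, "product_fit"), ("product", 1, "product_fit"),
   ("support", 2, "support_issues"), ("service", 2, "support_issues"),
   ("help", 2, "support_issues"), ("response", 2, "support_issues"),
   ("competitor", 3, "competition"), ("alternative", 3, "competition"),
   ("switched", 3, "competition"),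
   ("business", 4, "business_change"), ("reorganization", 4, "business_change"),
   ("merger", 4, "business_change"), ("acquisition", 4, "business_change"),
   ("usage", 5, "usage_low"), ("adoption", 5, "usage_low"),
   ("inactive", 5, "usage_low"), ("engagement", 5, "usage_low")]

-- one iteration of Source B's loop: keep the lower-priority match
def pvStep (rl : String) (best : Int × String) (e : String × Int × String) : Int × String :=
  if e.2.1 < best.1 ∧ PySem.Str.isIn e.1 rl then (e.2.1, e.2.2) else best

def categorize_churn_reason_py_alt (churn_reason : String) : String :=
  let reason_lower := PySem.Str.lower churn_reason
  (pvKeywordIndex.foldl (pvStep reason_lower) (7, "unknown")).2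

-- ===== PRECONDITION & SPEC =====
def Spec_categorize_churn_reason_py (churn_reason : String) (out : String) : Prop := out = categorize_churn_reason_py_alt churn_reason
instance (churn_reason : String) (out : String) : Decidable (Spec_categorize_churn_reason_py churn_reason out) := by unfold Spec_categorize_churn_reason_py; infer_instance

-- ===== CLAIM (what is proved, stated in full; the proofs are below) =====
def Claim_equal_categorize_churn_reason_py : Prop := ∀ (churn_reason : String), Dom_categorize_churn_reason_py churn_reason → Spec_categorize_churn_reason_py churn_reason (categorize_churn_reason_py churn_reason)

-- ===== LEMMAS AND PROOFS =====

-- folding a uniform-priority group never lowers the accumulator below its own priority,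
-- so a group whose priority is ≥ the accumulator's leaves it unchanged
theorem pv_fold_skip (rl : String) (acc : Int × String) (p : Int) (l : String)
    (ws : List String) (h : acc.1 ≤ p) :
    List.foldl (pvStep rl) acc (ws.map (fun w => (w, p, l))) = acc := by
  induction ws with
  | nil => rfl
  | cons w ws ih =>
      simp only [List.map_cons, List.foldl_cons, pvStep]
      rw [if_neg (by intro hc; exact absurd hc.1 (not_lt.mpr h))]
      exact ih

-- folding a uniform-priority group from a strictly higher-priority accumulator
-- yields (p, l) iff some word of the group occurs, else the accumulator
theorem pv_fold_group (rl : String) (q : Int) (lb : String) (p : Int) (l : String)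
    (ws : List String) (h : p < q) :
    List.foldl (pvStep rl) (q, lb) (ws.map (fun w => (w, p, l))) =
      if ws.any (fun w => PySem.Str.isIn w rl) then (p, l) else (q, lb) := by
  induction ws with
  | nil => rfl
  | cons w ws ih =>
      simp only [List.map_cons, List.foldl_cons, List.any_cons]
      by_cases hw : PySem.Str.isIn w rl = true
      · have hstep : pvStep rl (q, lb) (w, p, l) = (p, l) := by
          simp only [pvStep]; exact if_pos (by exact ⟨h, hw⟩)
        rw [hstep, pv_fold_skip rl (p, l) p l ws le_rfl]
        simp only [hw, Bool.true_or, reduceIte]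
      · simp only [Bool.not_eq_true] at hw
        have hstep : pvStep rl (q, lb) (w, p, l) = (q, lb) := by
          simp only [pvStep]
          exact if_neg (fun hc => (Bool.eq_false_iff.mp hw) hc.2)
        rw [hstep, ih]
        simp only [hw, Bool.false_or]

-- the flat index is the concatenation of the six uniform-priority groups
theorem pv_index_eq :
    pvKeywordIndex =
      (["price", "cost", "expensive", "budget"].map (fun w => (w, (0 : Int), "price"))) ++
      (["feature", "functionality", "capability", "product"].map (fun w => (w, (1 : Int), "product_fit"))) ++
      (["support", "service", "help", "response"].map (fun w => (w, (2 : Int), "support_issues"))) ++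
      (["competitor", "alternative", "switched"].map (fun w => (w, (3 : Int), "competition"))) ++
      (["business", "reorganization", "merger", "acquisition"].map (fun w => (w, (4 : Int), "business_change"))) ++
      (["usage", "adoption", "inactive", "engagement"].map (fun w => (w, (5 : Int), "usage_low"))) := rfl

-- ===== VERDICT (by name: the statement is the Claim_ definition above) =====
theorem categorize_churn_reason_py_spec : Claim_equal_categorize_churn_reason_py := by
  intro s _
  unfold Spec_categorize_churn_reason_py categorize_churn_reason_py categorize_churn_reason_py_alt
  set rl := PySem.Str.lower s with hrl
  rw [pv_index_eq]
  simp only [List.foldl_append]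
  rw [pv_fold_group rl 7 "unknown" 0 "price" _ (by norm_num)]
  by_cases h1 : (["price", "cost", "expensive", "budget"].any (fun w => PySem.Str.isIn w rl)) = true
  · simp only [if_pos h1]
    rw [pv_fold_skip rl (0, "price") 1 _ _ (by norm_num),
        pv_fold_skip rl (0, "price") 2 _ _ (by norm_num),
        pv_fold_skip rl (0, "price") 3 _ _ (by norm_num),
        pv_fold_skip rl (0, "price") 4 _ _ (by norm_num),
        pv_fold_skip rl (0, "price") 5 _ _ (by norm_num)]
  · simp only [if_neg h1]
    rw [pv_fold_group rl 7 "unknown" 1 "product_fit" _ (by norm_num)]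
    by_cases h2 : (["feature", "functionality", "capability", "product"].any (fun w => PySem.Str.isIn w rl)) = true
    · simp only [if_pos h2]
      rw [pv_fold_skip rl (1, "product_fit") 2 _ _ (by norm_num),
          pv_fold_skip rl (1, "product_fit") 3 _ _ (by norm_num),
          pv_fold_skip rl (1, "product_fit") 4 _ _ (by norm_num),
          pv_fold_skip rl (1, "product_fit") 5 _ _ (by norm_num)]
    · simp only [if_neg h2]
      rw [pv_fold_group rl 7 "unknown" 2 "support_issues" _ (by norm_num)]
      by_cases h3 : (["support", "service", "help", "response"].any (fun w => PySem.Str.isIn w rl)) = true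
      · simp only [if_pos h3]
        rw [pv_fold_skip rl (2, "support_issues") 3 _ _ (by norm_num),
            pv_fold_skip rl (2, "support_issues") 4 _ _ (by norm_num),
            pv_fold_skip rl (2, "support_issues") 5 _ _ (by norm_num)]
      · simp only [if_neg h3]
        rw [pv_fold_group rl 7 "unknown" 3 "competition" _ (by norm_num)]
        by_cases h4 : (["competitor", "alternative", "switched"].any (fun w => PySem.Str.isIn w rl)) = true
        · simp only [if_pos h4]
          rw [pv_fold_skip rl (3, "competition") 4 _ _ (by norm_num),
              pv_fold_skip rl (3, "competition") 5 _ _ (by norm_num)]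
        · simp only [if_neg h4]
          rw [pv_fold_group rl 7 "unknown" 4 "business_change" _ (by norm_num)]
          by_cases h5 : (["business", "reorganization", "merger", "acquisition"].any (fun w => PySem.Str.isIn w rl)) = true
          · simp only [if_pos h5]
            rw [pv_fold_skip rl (4, "business_change") 5 _ _ (by norm_num)]
          · simp only [if_neg h5]
            rw [pv_fold_group rl 7 "unknown" 5 "usage_low" _ (by norm_num)]
            by_cases h6 : (["usage", "adoption", "inactive", "engagement"].any (fun w => PySem.Str.isIn w rl)) = true
            · simp only [if_pos h6]
            · simp only [if_neg h6]
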